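-- pv_equiv track=rewrite | github.com/soyjubilado/AdventOfCode | 2025/06/prog202506.py | RotateData
-- ===== SOURCE A (Python) =====
-- def SquareUpLines(lines):
--   """Pad lines with space to make them equal length."""
--   length = max([len(line) for line in lines])
--   answer = []
--
--   for line in lines:
--     while len(line) < length:
--       line += ' '
--     answer.append(line)
--
--   return answer
--
-- def RotateData(lines):
--   """Rotate everything counterclockwise"""
--   done = []
--   problem = []
--   lines = SquareUpLines(lines)
--
--   for i in range(len(lines[0])):
--     newline = ''.join(line[i] for line in lines)
--     if newline.strip():
--       problem.append(newline)
--     else: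
--       done.append(''.join(problem[::-1]))
--       problem = []
--   done.append(''.join(problem[::-1]))
--   return done[::-1]
-- ===== SOURCE B (Python) =====
-- def RotateData(lines):
--   """Rotate everything counterclockwise"""
--   width = max(len(line) for line in lines)
--
--   def ch(line, i):
--     return line[i] if i < len(line) else ' '
--
--   def blank(i):
--     return all(ch(line, i).isspace() for line in lines)
--
--   seps = [i for i in range(width) if blank(i)]
--   bounds = [-1] + seps + [width]
--   groups = [range(a + 1, b) for a, b in zip(bounds, bounds[1:])]
--   return [''.join(ch(line, i) for i in reversed(g) for line in lines)
--           for g in reversed(groups)]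
-- ===== Notes on version B (the rewrite author's own statement) =====
-- stated objective: alternative
-- what changed: A pads the lines and runs one fused transpose-detect-flush loop with accumulator state (problem/done) and per-group reversals; B does no padding and keeps no loop state: it computes the blank-column indices, turns consecutive bounds pairs into index ranges, and emits each output string directly by double indexing over those ranges.
-- outside the precondition, e.g. on RotateData([]): A raises ValueError, B raises ValueError
import Mathlib
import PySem

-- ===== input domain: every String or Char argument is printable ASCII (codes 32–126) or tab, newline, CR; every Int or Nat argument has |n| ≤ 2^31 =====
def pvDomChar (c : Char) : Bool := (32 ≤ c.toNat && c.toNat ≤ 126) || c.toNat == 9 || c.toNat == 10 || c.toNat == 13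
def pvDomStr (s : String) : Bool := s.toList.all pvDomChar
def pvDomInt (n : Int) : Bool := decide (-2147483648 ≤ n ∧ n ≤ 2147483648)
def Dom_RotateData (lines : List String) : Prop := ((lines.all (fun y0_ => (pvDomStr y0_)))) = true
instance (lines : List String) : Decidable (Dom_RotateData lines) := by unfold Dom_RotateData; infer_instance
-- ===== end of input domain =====

-- B replaces A's pad-then-streaming-accumulator loop by index arithmetic: it locates the blank
-- column indices, turns consecutive bounds into index ranges, and emits each output string
-- directly by double indexing — no padding pass and no flush state machine (alternative decomposition).

-- ===== PORT A =====

-- the `while len(line) < length: line += ' '` loop of SquareUpLines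
def pvPad (cs : List Char) (length : Int) : List Char :=
  if (cs.length : Int) < length then pvPad (cs ++ [' ']) length else cs
termination_by (length - cs.length).toNat
decreasing_by simp; omega

-- max([...]) raises ValueError on [] : excluded by Pre_RotateData; .getD 0 is never used inside Pre_
def SquareUpLinesA (lines : List String) : List String :=
  let length := (PySem.List.max? (lines.map PySem.Str.len) id).getD 0
  lines.foldl (fun answer line => answer ++ [String.ofList (pvPad line.toList length)]) []

def RotateData (lines : List String) : List String :=
  let ls := SquareUpLinesA lines
  -- lines[0] : in range whenever lines ≠ [] (Pre_); .getD is never used inside Pre_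
  let first := (PySem.List.pyGet? ls 0).getD ""
  -- ''.join(line[i] for line in lines) : each line[i] is one char (in range for i < width), joined = String.ofList
  let st := (PySem.List.pyRange 0 (PySem.Str.len first) 1).foldl
    (fun (st : List String × List String) i =>
      let newline := String.ofList (ls.map (fun line => (PySem.Str.pyGet? line i).getD ' '))
      if PySem.Str.strip newline ≠ "" then (st.1, st.2 ++ [newline])
      else (st.1 ++ [PySem.Str.join "" st.2.reverse], [])) ([], [])
  (st.1 ++ [PySem.Str.join "" st.2.reverse]).reverse

-- ===== PORT B =====

-- ch(line, i) = line[i] if i < len(line) else ' '  (i is always ≥ 0 here; line[i] is in range when i < len)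
def pvCh (line : String) (i : Int) : Char :=
  if i < PySem.Str.len line then (PySem.Str.pyGet? line i).getD ' ' else ' '

-- blank(i) = all(ch(line, i).isspace() for line in lines)
def pvBlank (lines : List String) (i : Int) : Bool :=
  lines.all (fun line => PySem.Chars.isspace (pvCh line i))

def RotateData_alt (lines : List String) : List String :=
  -- max(...) raises ValueError on [] : excluded by Pre_RotateData; .getD 0 is never used inside Pre_
  let width := (PySem.List.max? (lines.map PySem.Str.len) id).getD 0
  let seps := (PySem.List.pyRange 0 width 1).filter (pvBlank lines)
  let bounds := [-1] ++ seps ++ [width]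
  let groups := (bounds.zip bounds.tail).map (fun ab => PySem.List.pyRange (ab.1 + 1) ab.2 1)
  -- ''.join of single characters = String.ofList of the character list
  groups.reverse.map (fun g =>
    String.ofList (g.reverse.flatMap (fun i => lines.map (fun line => pvCh line i))))

-- ===== PRECONDITION & SPEC =====
-- Pre_ excludes only the empty list, on which both A and B raise ValueError (max of an empty sequence)
def Pre_RotateData (lines : List String) : Prop := lines ≠ []
instance (lines : List String) : Decidable (Pre_RotateData lines) := by unfold Pre_RotateData; infer_instance
def pvWitness_RotateData : List String := ["ab ", "c"]

def Spec_RotateData (lines : List String) (out : List String) : Prop := out = RotateData_alt lines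
instance (lines : List String) (out : List String) : Decidable (Spec_RotateData lines out) := by unfold Spec_RotateData; infer_instance

-- ===== CLAIM (what is proved, stated in full; the proofs are below) =====
def Claim_equal_RotateData : Prop := ∀ (lines : List String), Dom_RotateData lines → Pre_RotateData lines → Spec_RotateData lines (RotateData lines)

-- ===== LEMMAS AND PROOFS =====

-- ''.join(problem[::-1]) on the string level
def pvEmit (p : List String) : String := PySem.Str.join "" p.reverse

-- A's segmentation of a column list, written as structural recursion
def pvSegsE (p : List String) : List String → List String
  | [] => [pvEmit p]
  | c :: cs => if PySem.Str.strip c ≠ "" then pvSegsE (p ++ [c]) cs else pvEmit p :: pvSegsE [] cs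

-- splitting a list of column indices at the blank ones
def pvSegsIdx (P : Int → Bool) : List Int → List (List Int)
  | [] => [[]]
  | i :: is =>
    if P i then [] :: pvSegsIdx P is
    else match pvSegsIdx P is with
         | g :: gs => (i :: g) :: gs
         | [] => [[i]]

theorem pvSegsIdx_ne_nil (P : Int → Bool) (is : List Int) : pvSegsIdx P is ≠ [] := by
  induction is with
  | nil => simp [pvSegsIdx]
  | cons i is ih =>
    simp only [pvSegsIdx]
    split
    · simp
    · cases h : pvSegsIdx P is with
      | nil => simp
      | cons g gs => simp

theorem pvSegsIdx_mem (P : Int → Bool) (is : List Int) (g : List Int) (i : Int)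
    (hg : g ∈ pvSegsIdx P is) (hi : i ∈ g) : i ∈ is := by
  induction is generalizing g with
  | nil => simp [pvSegsIdx] at hg; simp [hg] at hi
  | cons j js ih =>
    simp only [pvSegsIdx] at hg
    split at hg
    · rcases List.mem_cons.mp hg with h | h
      · simp [h] at hi
      · exact List.mem_cons_of_mem _ (ih g h hi)
    · cases h : pvSegsIdx P js with
      | nil => exact absurd h (pvSegsIdx_ne_nil P js)
      | cons g0 gs =>
        rw [h] at hg
        rcases List.mem_cons.mp hg with h1 | h1
        · subst h1
          rcases List.mem_cons.mp hi with h2 | h2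
          · simp [h2]
          · exact List.mem_cons_of_mem _ (ih g0 (by simp [h]) h2)
        · exact List.mem_cons_of_mem _ (ih g (by simp [h, h1]) hi)

-- A's fold equals the structural segmentation
theorem fold_segsE (cols : List String) (d p : List String) :
    (let st := cols.foldl (fun (st : List String × List String) c =>
        if PySem.Str.strip c ≠ "" then (st.1, st.2 ++ [c])
        else (st.1 ++ [pvEmit st.2], [])) (d, p)
     st.1 ++ [pvEmit st.2]) = d ++ pvSegsE p cols := by
  induction cols generalizing d p with
  | nil => rfl
  | cons c cs ih =>
    simp only [List.foldl_cons, pvSegsE]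
    by_cases hb : PySem.Str.strip c ≠ ""
    · rw [if_pos hb, if_pos hb]
      exact ih d (p ++ [c])
    · rw [if_neg hb, if_neg hb]
      rw [ih (d ++ [pvEmit p]) []]
      simp

-- the segmentation of mapped columns, through the index segmentation
theorem segsE_map (col : Int → String) (P : Int → Bool) (idxs : List Int)
    (h : ∀ i ∈ idxs, (P i = true ↔ PySem.Str.strip (col i) = "")) (p : List String) :
    pvSegsE p (idxs.map col) =
      match pvSegsIdx P idxs with
      | g :: gs => pvEmit (p ++ g.map col) :: gs.map (fun g => pvEmit (g.map col))
      | [] => [] := by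
  induction idxs generalizing p with
  | nil => simp [pvSegsE, pvSegsIdx]
  | cons i is ih =>
    have hi := h i (List.mem_cons_self)
    have hrest : ∀ j ∈ is, (P j = true ↔ PySem.Str.strip (col j) = "") :=
      fun j hj => h j (List.mem_cons_of_mem _ hj)
    simp only [List.map_cons, pvSegsE, pvSegsIdx]
    by_cases hP : P i = true
    · have hs : ¬ PySem.Str.strip (col i) ≠ "" := by simp [hi.mp hP]
      rw [if_neg hs, if_pos hP, ih hrest []]
      cases hx : pvSegsIdx P is with
      | nil => exact absurd hx (pvSegsIdx_ne_nil P is)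
      | cons g gs => simp
    · have hs : PySem.Str.strip (col i) ≠ "" := by
        intro he; exact hP (hi.mpr he)
      rw [if_pos hs, if_neg hP, ih hrest (p ++ [col i])]
      cases hx : pvSegsIdx P is with
      | nil => exact absurd hx (pvSegsIdx_ne_nil P is)
      | cons g gs => simp

-- B's zip-of-bounds construction equals the index segmentation
theorem zip_bounds (P : Int → Bool) (b : Int) (n : Nat) : ∀ (a : Int), (b - a).toNat = n → a ≤ b →
    (((a - 1) :: ((PySem.List.pyRange a b 1).filter P ++ [b])).zip
        ((PySem.List.pyRange a b 1).filter P ++ [b])).map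
      (fun ab => PySem.List.pyRange (ab.1 + 1) ab.2 1)
    = pvSegsIdx P (PySem.List.pyRange a b 1) := by
  induction n with
  | zero =>
    intro a hn hab
    have hba : b = a := by omega
    subst hba
    rw [PySem.List.pyRange_one_eq_nil le_rfl]
    simp [pvSegsIdx]
  | succ n ih =>
    intro a hn hab
    have hlt : a < b := by omega
    rw [PySem.List.pyRange_one_cons hlt]
    have ih' := ih (a + 1) (by omega) (by omega)
    by_cases hP : P a = true
    · simp only [List.filter_cons, hP, if_pos]
      simp only [List.cons_append, List.zip_cons_cons, List.map_cons]
      simp only [pvSegsIdx, hP, if_pos]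
      rw [List.cons_eq_cons]
      refine ⟨PySem.List.pyRange_one_eq_nil (by omega), by simpa using ih'⟩
    · simp only [List.filter_cons, hP]
      simp only [Bool.false_eq_true, if_false]
      -- the head of seps' ++ [b] is > a in both cases
      cases hf : (PySem.List.pyRange (a+1) b 1).filter P with
      | nil =>
        rw [hf] at ih'
        simp only [List.nil_append, List.zip_cons_cons, List.map_cons, List.zip_nil_right,
          List.map_nil] at ih' ⊢
        simp only [pvSegsIdx, hP, Bool.false_eq_true, if_false]
        rw [← ih']
        have h1 : a - 1 + 1 = a := by omega
        have h2 : a + 1 - 1 + 1 = a + 1 := by omega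
        rw [h1, h2, PySem.List.pyRange_one_cons hlt]
      | cons s ss =>
        have hs : a + 1 ≤ s := by
          have : s ∈ (PySem.List.pyRange (a+1) b 1).filter P := by simp [hf]
          have := (PySem.List.mem_pyRange_one.mp (List.mem_of_mem_filter this)).1
          omega
        rw [hf] at ih'
        simp only [List.cons_append, List.zip_cons_cons, List.map_cons] at ih' ⊢
        simp only [pvSegsIdx, hP, Bool.false_eq_true, if_false]
        rw [← ih']
        have h1 : a - 1 + 1 = a := by omega
        have h2 : a + 1 - 1 + 1 = a + 1 := by omega
        rw [h1, h2, PySem.List.pyRange_one_cons (by omega : a < s)]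

theorem pvPad_eq (cs : List Char) (n : Int) :
    pvPad cs n = cs ++ List.replicate ((n - cs.length).toNat) ' ' := by
  fun_induction pvPad cs n with
  | case1 cs h ih =>
    rw [ih, List.append_assoc]
    congr 1
    have he : (n - (cs.length:Int)).toNat = (n - ((cs ++ [' ']).length:Int)).toNat + 1 := by
      simp; omega
    rw [he, List.replicate_succ]; rfl
  | case2 cs h =>
    have he : (n - (cs.length:Int)).toNat = 0 := by omega
    simp [he]

theorem join_empty_flatten (parts : List (List Char)) :
    PySem.Chars.join [] parts = parts.flatten := by
  induction parts with
  | nil => rfl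
  | cons x xs ih => cases xs with
    | nil => simp [PySem.Chars.join, List.intercalate]
    | cons y ys => simp_all [PySem.Chars.join, List.intercalate]

-- the padded character at i ≥ 0 equals B's ch(line, i)
theorem pad_char (line : String) (W i : Int) (hi : 0 ≤ i) :
    (PySem.Str.pyGet? (String.ofList (line.toList ++ List.replicate ((W - PySem.Str.len line).toNat) ' ')) i).getD ' '
      = pvCh line i := by
  unfold pvCh
  simp only [PySem.Str.pyGet?_eq, PySem.Chars.pyGet?, PySem.List.pyGet?, String.toList_ofList,
    PySem.Str.len_eq, PySem.List.pyIdx?, if_pos hi]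
  have hlen : (line.toList ++ List.replicate ((W - (line.toList.length : Int)).toNat) ' ').length
      = line.toList.length + ((W - (line.toList.length : Int)).toNat) := by
    rw [List.length_append, List.length_replicate]
  by_cases hlt : i < (line.toList.length : Int)
  · rw [if_pos hlt]
    rw [if_pos (by rw [hlen]; push_cast; omega :
      i < ((line.toList ++ List.replicate ((W - (line.toList.length : Int)).toNat) ' ').length : Int))]
    simp only [Option.bind]
    rw [List.getElem?_append_left (by omega : i.toNat < line.toList.length)]
    rw [if_pos (by simpa using hlt)]
  · rw [if_neg hlt]
    by_cases hW : i < ((line.toList ++ List.replicate ((W - (line.toList.length : Int)).toNat) ' ').length : Int)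
    · rw [if_pos hW]
      simp only [Option.bind]
      rw [List.getElem?_append_right (by omega : line.toList.length ≤ i.toNat)]
      rw [List.getElem?_replicate]
      rw [if_pos (by rw [hlen] at hW; push_cast at hW; omega)]
      rfl
    · rw [if_neg hW]
      rfl

-- strip s == '' iff every character is whitespace
theorem strip_eq_empty_iff (s : String) :
    (PySem.Str.strip s = "") ↔ s.toList.all PySem.Chars.isspace := by
  rw [← String.toList_inj, PySem.Str.toList_strip]
  have h0 : ("" : String).toList = [] := rfl
  rw [h0]
  unfold PySem.Chars.strip PySem.Chars.rstrip PySem.Chars.lstrip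
  rw [List.reverse_eq_nil_iff, List.dropWhile_eq_nil_iff, List.all_eq_true]
  constructor
  · intro h x hx
    rw [← List.takeWhile_append_dropWhile (p := PySem.Chars.isspace) (l := s.toList)] at hx
    rcases List.mem_append.mp hx with h1 | h1
    · exact List.mem_takeWhile_imp h1
    · exact h x (List.mem_reverse.mpr h1)
  · intro h x hx
    exact h x ((List.dropWhile_sublist _).subset (List.mem_reverse.mp hx))

-- A's whole column loop, in piped-column form
theorem fold_segsE_idx (col : Int → String) (idxs : List Int) :
    (let st := idxs.foldl (fun (st : List String × List String) i =>
        let newline := col i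
        if PySem.Str.strip newline ≠ "" then (st.1, st.2 ++ [newline])
        else (st.1 ++ [PySem.Str.join "" st.2.reverse], [])) ([], [])
     (st.1 ++ [PySem.Str.join "" st.2.reverse]).reverse) = (pvSegsE [] (idxs.map col)).reverse := by
  have h := fold_segsE (idxs.map col) [] []
  simp only [pvEmit, List.nil_append] at h
  rw [List.foldl_map] at h
  exact congrArg List.reverse h

theorem max?_cons_some {x : Int} {xs : List Int} :
    ∃ m, PySem.List.max? (x :: xs) id = some m := by
  unfold PySem.List.max?
  simp only [List.foldl_cons]
  induction xs generalizing x with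
  | nil => exact ⟨x, rfl⟩
  | cons y ys ih =>
    simp only [List.foldl_cons]
    by_cases h : x < y
    · simpa [h] using ih (x := y)
    · simpa [h] using ih (x := x)

-- ===== VERDICT (by name: the statement is the Claim_ definition above) =====
theorem RotateData_spec : Claim_equal_RotateData := by
  intro lines _ hpre
  unfold Spec_RotateData RotateData RotateData_alt SquareUpLinesA
  cases lines with
  | nil => exact absurd rfl hpre
  | cons l0 rest =>
  simp only []
  obtain ⟨m, hm⟩ : ∃ m, PySem.List.max? ((l0 :: rest).map PySem.Str.len) id = some m := by
    simpa using max?_cons_some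
  have hmax : ∀ s ∈ (l0 :: rest), PySem.Str.len s ≤ m := by
    intro s hs
    simpa using PySem.List.max?_isMax hm (PySem.Str.len s) (List.mem_map_of_mem hs)
  have hm0 : 0 ≤ m := by
    have := PySem.List.max?_mem hm
    obtain ⟨s, hs, rfl⟩ := List.mem_map.mp this
    simp
  rw [hm]
  simp only [Option.getD_some]
  rw [PySem.List.foldl_append_singleton_eq_map]
  simp only [List.nil_append]
  have hmapeq : (l0 :: rest).map (fun line => String.ofList (pvPad line.toList m))
      = (l0 :: rest).map (fun line =>
          String.ofList (line.toList ++ List.replicate ((m - PySem.Str.len line).toNat) ' ')) := by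
    apply List.map_congr_left
    intro t _
    rw [pvPad_eq]
    simp
  rw [hmapeq]
  set padded := (l0 :: rest).map (fun line =>
      String.ofList (line.toList ++ List.replicate ((m - PySem.Str.len line).toNat) ' ')) with hpadded
  have hfirst : PySem.Str.len ((PySem.List.pyGet? padded 0).getD "") = m := by
    rw [hpadded]
    simp only [List.map_cons, PySem.List.pyGet?_zero_cons, Option.getD_some, PySem.Str.len_eq]
    have hle := hmax l0 (List.mem_cons_self)
    simp only [PySem.Str.len_eq] at hle ⊢
    simp only [String.toList_ofList, List.length_append, List.length_replicate]
    push_cast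
    omega
  rw [hfirst]
  -- the padded column characters are B's ch on the original lines
  have hchar : ∀ i : Int, 0 ≤ i →
      padded.map (fun line => (PySem.Str.pyGet? line i).getD ' ')
        = (l0 :: rest).map (fun line => pvCh line i) := by
    intro i hi
    rw [hpadded, List.map_map]
    apply List.map_congr_left
    intro t _
    exact pad_char t m i hi
  -- A's side: column loop → pvSegsE → pvSegsIdx
  rw [fold_segsE_idx (fun i => String.ofList (padded.map (fun line => (PySem.Str.pyGet? line i).getD ' ')))
        (PySem.List.pyRange 0 m 1)]
  have hblank : ∀ i ∈ PySem.List.pyRange 0 m 1, (pvBlank (l0 :: rest) i = true ↔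
      PySem.Str.strip (String.ofList (padded.map (fun line => (PySem.Str.pyGet? line i).getD ' '))) = "") := by
    intro i hin
    have hi : 0 ≤ i := (PySem.List.mem_pyRange_one.mp hin).1
    rw [strip_eq_empty_iff]
    simp only [String.toList_ofList]
    rw [hchar i hi, List.all_map]
    unfold pvBlank
    simp [Function.comp]
  rw [segsE_map _ (pvBlank (l0 :: rest)) _ hblank []]
  -- B's side: bounds/zip → pvSegsIdx
  have hz := zip_bounds (pvBlank (l0 :: rest)) m (m - 0).toNat 0 rfl hm0
  norm_num at hz
  simp only [List.cons_append, List.nil_append, List.tail_cons]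
  rw [hz]
  -- both sides are now maps over pvSegsIdx; compare group by group
  cases hx : pvSegsIdx (pvBlank (l0 :: rest)) (PySem.List.pyRange 0 m 1) with
  | nil => exact absurd hx (pvSegsIdx_ne_nil _ _)
  | cons g gs =>
  rw [List.map_reverse]
  have hpt : ∀ grp ∈ g :: gs,
      pvEmit (grp.map (fun i =>
          String.ofList (padded.map (fun line => (PySem.Str.pyGet? line i).getD ' '))))
        = String.ofList (grp.reverse.flatMap (fun i =>
            (l0 :: rest).map (fun line => pvCh line i))) := by
    intro grp hgrp
    have hsub : ∀ i ∈ grp, (0:Int) ≤ i := by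
      intro i hi
      have hmem := pvSegsIdx_mem _ _ grp i (hx ▸ hgrp) hi
      exact (PySem.List.mem_pyRange_one.mp hmem).1
    rw [← String.toList_inj]
    unfold pvEmit
    rw [PySem.Str.toList_join]
    have h0 : ("" : String).toList = [] := rfl
    rw [h0, join_empty_flatten, String.toList_ofList]
    rw [← List.map_reverse, List.map_map, List.flatMap_def]
    congr 1
    apply List.map_congr_left
    intro i hi
    have hi0 := hsub i (List.mem_reverse.mp hi)
    simp only [Function.comp, String.toList_ofList]
    exact hchar i hi0
  exact congrArg List.reverse (List.map_congr_left hpt)
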